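-- pv_equiv track=rewrite | github.com/d-progonov/IPT-2020-FE81 | Labs/lab 6/functions.py | f
-- ===== SOURCE A (Python) =====
-- def f(n, a, c):
--
--     def g(n):
--         res = (a*n + a*c) % 10
--         return res
--
--     if (0 <= n <= 9):
--         return n
--
--     else:
--         res = g(n) * f((n-1-g(n)), a, c) + n
--         return res
-- ===== SOURCE B (Python) =====
-- def f(n, a, c):
--     # Phase 1: materialize the whole chain of recursion arguments as a list.
--     chain = [n]
--     while not (0 <= chain[-1] <= 9):
--         x = chain[-1]
--         chain.append(x - 1 - (a * x + a * c) % 10)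
--     # Phase 2: evaluate the chain back-to-front.
--     res = chain.pop()
--     while chain:
--         x = chain.pop()
--         res = ((a * x + a * c) % 10) * res + x
--     return res
-- ===== Notes on version B (the rewrite author's own statement) =====
-- stated objective: alternative
-- what changed: Replaces the linear non-tail recursion by two staged passes: first build the explicit list of chain arguments, then evaluate it back-to-front with an accumulator.
import Mathlib
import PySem

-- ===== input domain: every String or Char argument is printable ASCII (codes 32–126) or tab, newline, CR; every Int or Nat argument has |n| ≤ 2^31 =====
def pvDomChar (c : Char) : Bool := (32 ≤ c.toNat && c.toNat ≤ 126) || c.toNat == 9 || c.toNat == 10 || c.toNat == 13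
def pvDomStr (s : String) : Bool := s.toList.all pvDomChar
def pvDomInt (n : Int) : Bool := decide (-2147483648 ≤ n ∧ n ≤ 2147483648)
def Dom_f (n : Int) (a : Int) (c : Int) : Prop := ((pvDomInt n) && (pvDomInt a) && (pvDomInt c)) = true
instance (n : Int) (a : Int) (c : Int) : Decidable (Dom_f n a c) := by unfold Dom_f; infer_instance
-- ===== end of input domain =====

-- B replaces A's linear non-tail recursion by two staged passes (build the chain list, then
-- evaluate it back-to-front); objective: alternative decomposition, same cost.


-- ===== PORT A =====
-- A's recursion, with fuel n.toNat + 1 (each recursive step lowers n by at least 1 while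
-- n ≥ 10, so the fuel is never exhausted on Pre_f inputs; the 0-fuel value is unreachable there).
def fAux : Nat → Int → Int → Int → Int
  | 0, _, _, _ => 0
  | fuel + 1, n, a, c =>
    if 0 ≤ n ∧ n ≤ 9 then n
    else
      let g := PySem.Int.mod (a * n + a * c) 10
      g * fAux fuel (n - 1 - g) a c + n

def f (n : Int) (a : Int) (c : Int) : Int := fAux (n.toNat + 1) n a c

-- ===== PORT B =====
-- Phase 1 of B: build the chain list in reverse (head = most recent append), tail-recursively,
-- like the Python while-loop appending to `chain`.
def buildRev : Nat → Int → Int → List Int → List Int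
  | 0, _, _, acc => acc
  | fuel + 1, a, c, acc =>
    match acc with
    | [] => []
    | x :: _ =>
      if 0 ≤ x ∧ x ≤ 9 then acc
      else buildRev fuel a c ((x - 1 - PySem.Int.mod (a * x + a * c) 10) :: acc)

-- Phase 2 of B: pop from the end (= head of the reversed list) folding into res.
def evalRev (a c : Int) : Int → List Int → Int
  | res, [] => res
  | res, x :: rest => evalRev a c (PySem.Int.mod (a * x + a * c) 10 * res + x) rest

def f_alt (n : Int) (a : Int) (c : Int) : Int :=
  match buildRev (n.toNat + 1) a c [n] with
  | [] => 0
  | last :: rest => evalRev a c last rest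

-- ===== PRECONDITION & SPEC =====
-- Pre_f excludes n < 0, where the Python A recurses forever (RecursionError) and B loops forever.
def Pre_f (n : Int) (a : Int) (c : Int) : Prop := 0 ≤ n
instance (n : Int) (a : Int) (c : Int) : Decidable (Pre_f n a c) := by unfold Pre_f; infer_instance
def pvWitness_f : Int × Int × Int := (37, 3, 2)

def Spec_f (n : Int) (a : Int) (c : Int) (out : Int) : Prop := out = f_alt n a c
instance (n : Int) (a : Int) (c : Int) (out : Int) : Decidable (Spec_f n a c out) := by unfold Spec_f; infer_instance

-- ===== CLAIM (what is proved, stated in full; the proofs are below) =====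
def Claim_equal_f : Prop := ∀ (n : Int) (a : Int) (c : Int), Dom_f n a c → Pre_f n a c → Spec_f n a c (f n a c)

-- ===== LEMMAS AND PROOFS =====

theorem g_bounds (m : Int) : 0 ≤ PySem.Int.mod m 10 ∧ PySem.Int.mod m 10 ≤ 9 := by
  rw [PySem.Int.mod_eq_emod_of_pos (by norm_num)]
  constructor
  · exact Int.emod_nonneg m (by norm_num)
  · have := Int.emod_lt_of_pos m (show (0:Int) < 10 by norm_num); omega

-- buildRev from a seeded accumulator is the reversed abstract chain of its head.
def chainOf : Nat → Int → Int → Int → List Int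
  | 0, _, _, cur => [cur]
  | fuel + 1, a, c, cur =>
    if 0 ≤ cur ∧ cur ≤ 9 then [cur]
    else cur :: chainOf fuel a c (cur - 1 - PySem.Int.mod (a * cur + a * c) 10)

theorem buildRev_eq (fuel : Nat) : ∀ (a c x : Int) (pre : List Int),
    buildRev fuel a c (x :: pre) = (chainOf fuel a c x).reverse ++ pre := by
  induction fuel with
  | zero => intro a c x pre; simp [buildRev, chainOf]
  | succ k ih =>
    intro a c x pre
    by_cases h : 0 ≤ x ∧ x ≤ 9
    · simp [buildRev, chainOf, h]
    · simp only [buildRev, chainOf, if_neg h]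
      rw [ih]
      simp

theorem evalRev_append (a c : Int) : ∀ (l t : List Int) (r : Int),
    evalRev a c r (l ++ t) = evalRev a c (evalRev a c r l) t := by
  intro l
  induction l with
  | nil => intro t r; simp [evalRev]
  | cons x xs ih => intro t r; simp [evalRev, ih]

-- Evaluating the reversed chain back-to-front computes A's recursion.
theorem eval_rev_chain (fuel : Nat) : ∀ (n a c : Int), 0 ≤ n → n.toNat < fuel →
    ∃ last rest, (chainOf fuel a c n).reverse = last :: rest ∧
      evalRev a c last rest = fAux fuel n a c := by
  induction fuel with
  | zero => intro n a c _ h; omega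
  | succ k ih =>
    intro n a c hn _
    by_cases h : 0 ≤ n ∧ n ≤ 9
    · exact ⟨n, [], by simp [chainOf, h], by simp [evalRev, fAux, h]⟩
    · have hg := g_bounds (a * n + a * c)
      have h10 : 10 ≤ n := by omega
      set g := PySem.Int.mod (a * n + a * c) 10 with hgdef
      have hnext : 0 ≤ n - 1 - g ∧ (n - 1 - g).toNat < k := by omega
      obtain ⟨last, rest, hrev, heval⟩ := ih (n - 1 - g) a c hnext.1 hnext.2
      refine ⟨last, rest ++ [n], ?_, ?_⟩
      · simp only [chainOf, if_neg h, ← hgdef, List.reverse_cons, hrev]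
        simp
      · rw [evalRev_append, heval]
        simp only [fAux, if_neg h, ← hgdef, evalRev]

-- ===== VERDICT (by name: the statement is the Claim_ definition above) =====
theorem f_spec : Claim_equal_f := by
  intro n a c _ hpre
  unfold Spec_f f f_alt
  obtain ⟨last, rest, hrev, heval⟩ := eval_rev_chain (n.toNat + 1) n a c hpre (by omega)
  rw [buildRev_eq, List.append_nil, hrev]
  simp [heval]
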